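-- pv_equiv track=rewrite | github.com/nolanrbrady/ALPACA-RL | ALPACA/scaler_validator.py | _find_duplicate_columns
-- ===== SOURCE A (Python) =====
-- from typing import Dict, List, Sequence
--
-- def _find_duplicate_columns(columns: List[str]) -> List[str]:
--     seen = set()
--     duplicates = []
--     for col in columns:
--         if col in seen and col not in duplicates:
--             duplicates.append(col)
--         seen.add(col)
--     return duplicates
-- ===== SOURCE B (Python) =====
-- from typing import Dict, List, Sequence
--
-- def _find_duplicate_columns(columns):
--     # A column is a duplicate exactly at its second occurrence: the position i
--     # where it has appeared exactly once before (columns[:i].count(col) == 1).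
--     return [col for i, col in enumerate(columns) if columns[:i].count(col) == 1]
-- ===== Notes on version B (the rewrite author's own statement) =====
-- stated objective: simpler
-- what changed: A runs a stateful loop maintaining a seen-set and scanning the duplicates list for membership; B is a stateless one-line comprehension that keeps a column at index i exactly when it occurs exactly once in the prefix columns[:i] (its second occurrence), with no maintained state at all.
import Mathlib
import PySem

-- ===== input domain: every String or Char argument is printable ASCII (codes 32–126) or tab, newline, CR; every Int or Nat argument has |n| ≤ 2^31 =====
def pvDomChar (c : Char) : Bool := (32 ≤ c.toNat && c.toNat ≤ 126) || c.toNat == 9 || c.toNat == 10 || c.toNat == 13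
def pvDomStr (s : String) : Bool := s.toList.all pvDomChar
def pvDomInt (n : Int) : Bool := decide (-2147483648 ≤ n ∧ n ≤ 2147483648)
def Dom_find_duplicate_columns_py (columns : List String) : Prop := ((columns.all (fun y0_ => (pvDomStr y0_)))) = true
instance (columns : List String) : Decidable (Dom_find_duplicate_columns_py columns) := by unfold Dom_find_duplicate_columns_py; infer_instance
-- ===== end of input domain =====

-- B replaces A's stateful seen-set/duplicates loop by a stateless comprehension:
-- keep columns[i] exactly when it occurs exactly once in the prefix columns[:i] (simpler; same values).


-- ===== PORT A =====
-- seen = set(); duplicates = []; for col: if col in seen and col not in duplicates: duplicates.append(col); seen.add(col)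
def find_duplicate_columns_py (columns : List String) : List String :=
  (columns.foldl
    (fun (st : PySem.Set String × List String) col =>
      (PySem.Set.add st.1 col,
       if PySem.Set.contains st.1 col && !(st.2.contains col) then st.2 ++ [col] else st.2))
    (PySem.Set.empty, [])).2

-- ===== PORT B =====
-- [col for i, col in enumerate(columns) if columns[:i].count(col) == 1]
def find_duplicate_columns_py_alt (columns : List String) : List String :=
  (PySem.List.enumerate columns).filterMap
    (fun p => if PySem.List.count (PySem.List.slice columns none (some p.1)) p.2 == 1
              then some p.2 else none)

-- ===== PRECONDITION & SPEC =====
def Spec_find_duplicate_columns_py (columns : List String) (out : List String) : Prop :=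
  out = find_duplicate_columns_py_alt columns
instance (columns : List String) (out : List String) : Decidable (Spec_find_duplicate_columns_py columns out) := by
  unfold Spec_find_duplicate_columns_py; infer_instance

-- ===== CLAIM =====
def Claim_equal_find_duplicate_columns_py : Prop :=
  ∀ (columns : List String), Dom_find_duplicate_columns_py columns →
    Spec_find_duplicate_columns_py columns (find_duplicate_columns_py columns)

-- ===== LEMMAS AND PROOFS =====

-- B's comprehension with the prefix slice rewritten as List.take (proof-side normal form).
def pvGTake (L : List String) : List String :=
  (PySem.List.enumerate L).filterMap
    (fun p => if (L.take p.1.toNat).count p.2 == 1 then some p.2 else none)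

theorem pv_alt_eq_gTake (L : List String) :
    find_duplicate_columns_py_alt L = pvGTake L := by
  unfold find_duplicate_columns_py_alt pvGTake
  apply List.filterMap_congr
  intro p hp
  obtain ⟨k, hk, rfl⟩ := (PySem.List.mem_enumerate_iff _ _ _).mp hp
  simp [PySem.List.slice_to_natCast]

theorem pv_gTake_snoc (pre : List String) (c : String) :
    pvGTake (pre ++ [c]) = pvGTake pre ++ (if pre.count c == 1 then [c] else []) := by
  unfold pvGTake
  rw [PySem.List.enumerate_append, List.filterMap_append]
  congr 1
  · apply List.filterMap_congr
    intro p hp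
    obtain ⟨k, hk, rfl⟩ := (PySem.List.mem_enumerate_iff _ _ _).mp hp
    have : (pre ++ [c]).take k = pre.take k := List.take_append_of_le_length (le_of_lt hk)
    simp [this]
  · rw [PySem.List.enumerate_cons, PySem.List.enumerate_nil]
    simp only [List.filterMap_cons, List.filterMap_nil]
    have ht : (pre ++ [c]).take ((0 + (pre.length : Int)).toNat) = pre := by
      simp
    rw [ht]
    by_cases h : (List.count c pre == 1) = true
    · simp [h]
    · simp [h]

theorem pv_mem_gTake (pre : List String) (c : String) :
    c ∈ pvGTake pre ↔ 2 ≤ pre.count c := by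
  induction pre using List.reverseRecOn with
  | nil => simp [pvGTake]
  | append_singleton pre d ih =>
    rw [pv_gTake_snoc, List.mem_append, ih, List.count_append]
    by_cases hcd : c = d
    · subst hcd
      have hcs : List.count c [c] = 1 := by simp
      rw [hcs]
      by_cases h1 : pre.count c = 1
      · simp [h1]
      · have hb : (pre.count c == 1) = false := by simp [h1]
        simp only [hb, Bool.false_eq_true, if_false, List.not_mem_nil, or_false]
        omega
    · have hzero : List.count c [d] = 0 := by
        simp [Ne.symm hcd]
      rw [hzero]
      have hnm : c ∉ (if (pre.count d == 1) = true then [d] else []) := by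
        split <;> simp [hcd]
      constructor
      · rintro (h | h)
        · omega
        · exact absurd h hnm
      · intro h; left; omega

theorem pv_loopA (rest pre : List String) (seen : PySem.Set String)
    (hs : ∀ c, PySem.Set.contains seen c = true ↔ 1 ≤ pre.count c) :
    (rest.foldl
      (fun (st : PySem.Set String × List String) col =>
        (PySem.Set.add st.1 col,
         if PySem.Set.contains st.1 col && !(st.2.contains col) then st.2 ++ [col] else st.2))
      (seen, pvGTake pre)).2 = pvGTake (pre ++ rest) := by
  induction rest generalizing pre seen with
  | nil => simp
  | cons col rest ih =>
    simp only [List.foldl_cons]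
    have hdup : (pvGTake pre).contains col = true ↔ 2 ≤ pre.count col := by
      rw [List.contains_iff_mem]; exact pv_mem_gTake pre col
    have hbranch :
        (if PySem.Set.contains seen col && !((pvGTake pre).contains col)
         then pvGTake pre ++ [col] else pvGTake pre) = pvGTake (pre ++ [col]) := by
      rw [pv_gTake_snoc]
      by_cases h1 : List.count col pre = 1
      · have hcd : (pvGTake pre).contains col = false := by
          rw [Bool.eq_false_iff]; intro h; have := hdup.mp h; omega
        have hcs : PySem.Set.contains seen col = true := (hs col).mpr (by omega)
        have hb : (PySem.Set.contains seen col && !((pvGTake pre).contains col)) = true := by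
          rw [hcs, hcd]; rfl
        rw [hb]; simp [h1]
      · by_cases h2 : 2 ≤ List.count col pre
        · have hcd : (pvGTake pre).contains col = true := hdup.mpr h2
          have hb : (PySem.Set.contains seen col && !((pvGTake pre).contains col)) = false := by
            rw [hcd]; simp
          rw [hb]; simp [h1]
        · have hcs : PySem.Set.contains seen col = false := by
            rw [Bool.eq_false_iff]; intro h; have := (hs col).mp h; omega
          have hb : (PySem.Set.contains seen col && !((pvGTake pre).contains col)) = false := by
            rw [hcs]; rfl
          rw [hb]; simp [h1]
    rw [hbranch]
    have hs' : ∀ c, PySem.Set.contains (PySem.Set.add seen col) c = true ↔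
        1 ≤ (pre ++ [col]).count c := by
      intro c
      rw [PySem.Set.contains_iff, PySem.Set.mem_add, List.count_append, List.count_singleton]
      rw [← PySem.Set.contains_iff, hs c]
      by_cases hcc : c = col
      · subst hcc; simp
      · have : (col == c) = false := beq_eq_false_iff_ne.mpr (Ne.symm hcc)
        simp [hcc, this]
    have := ih (pre ++ [col]) (PySem.Set.add seen col) hs'
    rw [this, List.append_assoc]; rfl

-- ===== VERDICT =====
theorem find_duplicate_columns_py_spec : Claim_equal_find_duplicate_columns_py := by
  intro columns _
  unfold Spec_find_duplicate_columns_py find_duplicate_columns_py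
  rw [pv_alt_eq_gTake]
  have h0 : ∀ c, PySem.Set.contains (PySem.Set.empty : PySem.Set String) c = true ↔
      1 ≤ ([] : List String).count c := by
    intro c; simp [PySem.Set.empty]
  have := pv_loopA columns [] PySem.Set.empty h0
  simpa [pvGTake, PySem.List.enumerate_nil] using this
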